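-- pv_equiv track=rewrite | github.com/wilmurillo-ai/Design-Assistant | .skills/openclaw-skills/skills/lkilpatrick/boat-daily-check/scripts/boat-email-report.py | extract_inverter_data
-- ===== SOURCE A (Python) =====
-- def extract_inverter_data(diagnostics):
--     """Extract inverter/AC data from diagnostics"""
--     inverter_data = {"status": "AC In"}
--
--     for record in diagnostics:
--         if record.get("Device") != "VE.Bus System":
--             continue
--
--         code = record.get("code", "")
--         value = record.get("formattedValue", "")
--
--         # Look for AC input status
--         if code in ["IV1", "IV2"] or "input" in code.lower():
--             inverter_data["status"] = value
--
--     return inverter_data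
-- ===== SOURCE B (Python) =====
-- def extract_inverter_data(diagnostics):
--     """Extract inverter/AC data from diagnostics"""
--     records = list(diagnostics)
--     for record in reversed(records):
--         if record.get("Device") != "VE.Bus System":
--             continue
--         code = record.get("code", "")
--         if code in ["IV1", "IV2"] or "input" in code.lower():
--             return {"status": record.get("formattedValue", "")}
--     return {"status": "AC In"}
-- ===== Notes on version B (the rewrite author's own statement) =====
-- stated objective: alternative
-- what changed: Replaces the forward fold that overwrites the status on every matching record with a backward scan that returns at the first match (the last matching record), so no dict state is threaded through the loop.
import Mathlib
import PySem

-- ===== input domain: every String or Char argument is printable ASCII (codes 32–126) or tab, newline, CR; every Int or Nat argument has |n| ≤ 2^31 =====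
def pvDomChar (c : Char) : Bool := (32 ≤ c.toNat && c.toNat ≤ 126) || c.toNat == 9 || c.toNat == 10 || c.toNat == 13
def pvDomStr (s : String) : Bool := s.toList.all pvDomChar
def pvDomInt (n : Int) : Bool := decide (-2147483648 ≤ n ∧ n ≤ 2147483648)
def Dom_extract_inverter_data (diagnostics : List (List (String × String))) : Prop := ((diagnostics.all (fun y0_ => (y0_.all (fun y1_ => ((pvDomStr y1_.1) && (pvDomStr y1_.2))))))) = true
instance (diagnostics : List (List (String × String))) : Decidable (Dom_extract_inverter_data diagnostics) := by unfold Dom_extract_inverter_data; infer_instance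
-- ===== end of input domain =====

-- B replaces A's forward fold (overwriting the status on every match) by a backward scan
-- that returns at the first match; equal return values, no speed claim.

-- record.get(k) on a Python dict: first-match lookup in the association list
def pvRecGet? (record : List (String × String)) (k : String) : Option String :=
  (record.find? (fun p => p.1 == k)).map (·.2)

-- record.get(k, "") with default
def pvRecGetD (record : List (String × String)) (k : String) : String :=
  (pvRecGet? record k).getD ""

-- ===== PORT A =====
def extract_inverter_data (diagnostics : List (List (String × String))) : List (String × String) :=
  (diagnostics.foldl
    (fun inverter_data record =>
      if pvRecGet? record "Device" ≠ some "VE.Bus System" then inverter_data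
      else
        let code := pvRecGetD record "code"
        let value := pvRecGetD record "formattedValue"
        if (code == "IV1" || code == "IV2") || PySem.Str.isIn "input" (PySem.Str.lower code) then
          inverter_data.insert "status" value
        else inverter_data)
    (PySem.Dict.mk [("status", "AC In")])).items

-- ===== PORT B =====
-- the shared predicate of Source B: Device matches and code looks like AC input
def pvIsAcRecord (record : List (String × String)) : Bool :=
  if pvRecGet? record "Device" == some "VE.Bus System" then
    let code := pvRecGetD record "code"
    (code == "IV1" || code == "IV2") || PySem.Str.isIn "input" (PySem.Str.lower code)
  else false

-- Source B's reversed loop: first matching record from the given (already reversed) list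
def pvFindStatus : List (List (String × String)) → Option String
  | [] => none
  | record :: rest =>
      if pvIsAcRecord record then some (pvRecGetD record "formattedValue")
      else pvFindStatus rest

def extract_inverter_data_alt (diagnostics : List (List (String × String))) : List (String × String) :=
  match pvFindStatus diagnostics.reverse with
  | some v => [("status", v)]
  | none => [("status", "AC In")]

-- ===== PRECONDITION & SPEC =====
def Spec_extract_inverter_data (diagnostics : List (List (String × String))) (out : List (String × String)) : Prop := out = extract_inverter_data_alt diagnostics
instance (diagnostics : List (List (String × String))) (out : List (String × String)) : Decidable (Spec_extract_inverter_data diagnostics out) := by unfold Spec_extract_inverter_data; infer_instance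

-- ===== CLAIM (what is proved, stated in full; the proofs are below) =====
def Claim_equal_extract_inverter_data : Prop := ∀ (diagnostics : List (List (String × String))), Dom_extract_inverter_data diagnostics → Spec_extract_inverter_data diagnostics (extract_inverter_data diagnostics)

-- ===== LEMMAS AND PROOFS =====

-- searching an appended singleton: first try the front, then the new last element
lemma pvFindStatus_append_singleton (l : List (List (String × String))) (r : List (String × String)) :
    pvFindStatus (l ++ [r]) =
      match pvFindStatus l with
      | some v => some v
      | none => if pvIsAcRecord r then some (pvRecGetD r "formattedValue") else none := by
  induction l with
  | nil => simp [pvFindStatus]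
  | cons x xs ih =>
      simp only [List.cons_append, pvFindStatus]
      by_cases hx : pvIsAcRecord x
      · simp [hx]
      · simp [hx, ih]

-- A's loop body matched against B's predicate
lemma pvStep_eq (d : PySem.Dict String String) (r : List (String × String)) :
    (if pvRecGet? r "Device" ≠ some "VE.Bus System" then d
     else
       let code := pvRecGetD r "code"
       let value := pvRecGetD r "formattedValue"
       if (code == "IV1" || code == "IV2") || PySem.Str.isIn "input" (PySem.Str.lower code) then
         d.insert "status" value
       else d)
    = if pvIsAcRecord r then d.insert "status" (pvRecGetD r "formattedValue") else d := by
  simp only [pvIsAcRecord]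
  by_cases h : pvRecGet? r "Device" = some "VE.Bus System" <;> split_ifs <;> simp_all

-- overwriting the only key of a singleton dict
lemma pvInsert_singleton (s v : String) :
    (PySem.Dict.mk [("status", s)]).insert "status" v = PySem.Dict.mk [("status", v)] := by
  apply PySem.Dict.ext
  simp [PySem.Dict.items_insert, PySem.Dict.contains_mk]

-- loop invariant for the step in B's predicate form
lemma pvFoldB_invariant (xs : List (List (String × String))) (s : String) :
    (xs.foldl
      (fun d r => if pvIsAcRecord r then d.insert "status" (pvRecGetD r "formattedValue") else d)
      (PySem.Dict.mk [("status", s)]))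
    = PySem.Dict.mk [("status", (pvFindStatus xs.reverse).getD s)] := by
  induction xs generalizing s with
  | nil => simp [pvFindStatus]
  | cons r rest ih =>
      rw [List.foldl_cons, List.reverse_cons, pvFindStatus_append_singleton]
      by_cases h : pvIsAcRecord r
      · rw [if_pos h, pvInsert_singleton, ih]
        cases pvFindStatus rest.reverse <;> simp [h]
      · rw [if_neg h, ih]
        cases pvFindStatus rest.reverse <;> simp [h]

-- A's fold equals the B-form fold (the bodies agree pointwise)
lemma pvFold_invariant (xs : List (List (String × String))) (s : String) :
    (xs.foldl
      (fun inverter_data record =>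
        if pvRecGet? record "Device" ≠ some "VE.Bus System" then inverter_data
        else
          let code := pvRecGetD record "code"
          let value := pvRecGetD record "formattedValue"
          if (code == "IV1" || code == "IV2") || PySem.Str.isIn "input" (PySem.Str.lower code) then
            inverter_data.insert "status" value
          else inverter_data)
      (PySem.Dict.mk [("status", s)]))
    = PySem.Dict.mk [("status", (pvFindStatus xs.reverse).getD s)] := by
  rw [show (fun (inverter_data : PySem.Dict String String) (record : List (String × String)) =>
        if pvRecGet? record "Device" ≠ some "VE.Bus System" then inverter_data
        else
          let code := pvRecGetD record "code"
          let value := pvRecGetD record "formattedValue"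
          if (code == "IV1" || code == "IV2") || PySem.Str.isIn "input" (PySem.Str.lower code) then
            inverter_data.insert "status" value
          else inverter_data)
      = (fun d r => if pvIsAcRecord r then d.insert "status" (pvRecGetD r "formattedValue") else d)
      from funext fun d => funext fun r => pvStep_eq d r]
  exact pvFoldB_invariant xs s

-- ===== VERDICT (by name: the statement is the Claim_ definition above) =====
theorem extract_inverter_data_spec : Claim_equal_extract_inverter_data := by
  intro diagnostics _
  unfold Spec_extract_inverter_data extract_inverter_data extract_inverter_data_alt
  rw [pvFold_invariant]
  cases pvFindStatus diagnostics.reverse <;> simp
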